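-- pv_equiv track=rewrite | github.com/imahdimir/portfos-py-modules | portfos_py/Dev/maybe_useful_later.py | find_n_jmonth_ahead
-- ===== SOURCE A (Python) =====
-- def find_n_jmonth_ahead(current_month , howmany=1) :
--   if howmany == 1 :
--     if current_month % 100 == 12 :
--       next_month = (current_month // 100 + 1) * 100 + 1
--     else :
--       next_month = current_month + 1
--     return next_month
--   elif howmany == 0 :
--     return current_month
--   return find_n_jmonth_ahead(find_n_jmonth_ahead(current_month , 1) ,
--                              howmany - 1)
-- ===== SOURCE B (Python) =====
-- def find_n_jmonth_ahead(current_month, howmany=1):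
--     if howmany == 0:
--         return current_month
--     year, month0 = divmod(current_month, 100)
--     months = year * 12 + month0 - 1 + howmany
--     y, m = divmod(months, 12)
--     return y * 100 + m + 1
-- ===== Notes on version B (the rewrite author's own statement) =====
-- stated objective: faster
-- what changed: Replaced A's howmany-deep one-month-at-a-time recursion with O(1) closed-form arithmetic (year*12+month-1+howmany, then divmod back); Pre_ keeps the task's natural domain: month field at most 12 and nonnegative howmany, since month fields 13..99 are not valid YYYYMM encodings (there A's +1-stepping is not month arithmetic) and on negative howmany A recurses forever.
-- outside the precondition, e.g. on find_n_jmonth_ahead(202399, 1): A returns 202400, B returns 203104; on find_n_jmonth_ahead(202301, -1): A raises RecursionError, B returns 202212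
import Mathlib
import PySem

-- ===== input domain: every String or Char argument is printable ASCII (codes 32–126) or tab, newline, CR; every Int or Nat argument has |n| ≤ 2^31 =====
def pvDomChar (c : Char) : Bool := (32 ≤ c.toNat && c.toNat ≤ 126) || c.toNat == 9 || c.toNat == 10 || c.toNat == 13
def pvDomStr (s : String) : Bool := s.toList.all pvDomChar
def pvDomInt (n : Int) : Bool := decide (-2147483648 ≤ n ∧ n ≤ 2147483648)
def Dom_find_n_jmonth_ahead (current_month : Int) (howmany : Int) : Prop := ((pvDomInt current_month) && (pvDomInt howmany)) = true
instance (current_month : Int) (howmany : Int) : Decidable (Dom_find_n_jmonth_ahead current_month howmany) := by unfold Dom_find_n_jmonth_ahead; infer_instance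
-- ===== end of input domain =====

-- B replaces A's one-recursive-call-per-month recursion by closed-form year*12+month arithmetic (one divmod instead of howmany calls).

-- ===== PORT A =====
-- Literal port of A; the final `else 0` is a totalization guard for howmany < 0,
-- where the Python recurses forever (excluded by Pre_).
def find_n_jmonth_ahead (current_month : Int) (howmany : Int) : Int :=
  if howmany = 1 then
    if PySem.Int.mod current_month 100 = 12 then
      (PySem.Int.floordiv current_month 100 + 1) * 100 + 1
    else
      current_month + 1
  else if howmany = 0 then
    current_month
  else if 1 < howmany then
    find_n_jmonth_ahead (find_n_jmonth_ahead current_month 1) (howmany - 1)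
  else 0
termination_by howmany.toNat
decreasing_by all_goals omega

-- ===== PORT B =====
def find_n_jmonth_ahead_alt (current_month : Int) (howmany : Int) : Int :=
  if howmany = 0 then current_month
  else
    let year := PySem.Int.floordiv current_month 100
    let month0 := PySem.Int.mod current_month 100
    let months := year * 12 + month0 - 1 + howmany
    PySem.Int.floordiv months 12 * 100 + PySem.Int.mod months 12 + 1

-- ===== PRECONDITION & SPEC =====
-- Pre_ keeps the task's natural domain: month fields 13..99 are not valid YYYYMM
-- encodings (there A's +1-stepping is not month arithmetic), and howmany must be
-- nonnegative (for negative howmany A's recursion has no base case: RecursionError).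
def Pre_find_n_jmonth_ahead (current_month : Int) (howmany : Int) : Prop :=
  0 ≤ howmany ∧ current_month % 100 ≤ 12
instance (current_month : Int) (howmany : Int) : Decidable (Pre_find_n_jmonth_ahead current_month howmany) := by unfold Pre_find_n_jmonth_ahead; infer_instance
def pvWitness_find_n_jmonth_ahead : Int × Int := (202312, 2)

def Spec_find_n_jmonth_ahead (current_month : Int) (howmany : Int) (out : Int) : Prop := out = find_n_jmonth_ahead_alt current_month howmany
instance (current_month : Int) (howmany : Int) (out : Int) : Decidable (Spec_find_n_jmonth_ahead current_month howmany out) := by unfold Spec_find_n_jmonth_ahead; infer_instance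

-- ===== CLAIM (what is proved, stated in full; the proofs are below) =====
def Claim_equal_find_n_jmonth_ahead : Prop := ∀ (current_month : Int) (howmany : Int), Dom_find_n_jmonth_ahead current_month howmany → Pre_find_n_jmonth_ahead current_month howmany → Spec_find_n_jmonth_ahead current_month howmany (find_n_jmonth_ahead current_month howmany)

-- ===== LEMMAS AND PROOFS =====

-- A's one-month step.
def pvStep (m : Int) : Int :=
  if PySem.Int.mod m 100 = 12 then (PySem.Int.floordiv m 100 + 1) * 100 + 1 else m + 1

theorem fd100 (a : Int) : PySem.Int.floordiv a 100 = a / 100 :=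
  PySem.Int.floordiv_eq_ediv_of_pos (by norm_num)
theorem md100 (a : Int) : PySem.Int.mod a 100 = a % 100 :=
  PySem.Int.mod_eq_emod_of_pos (by norm_num)
theorem fd12 (a : Int) : PySem.Int.floordiv a 12 = a / 12 :=
  PySem.Int.floordiv_eq_ediv_of_pos (by norm_num)
theorem md12 (a : Int) : PySem.Int.mod a 12 = a % 12 :=
  PySem.Int.mod_eq_emod_of_pos (by norm_num)

-- a month field ≤ 12 stays ≤ 12 under A's step
theorem step_valid (m : Int) (h2 : m % 100 ≤ 12) : pvStep m % 100 ≤ 12 := by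
  simp only [pvStep, fd100, md100]
  split_ifs with h <;> omega

theorem alt_zero (m : Int) : find_n_jmonth_ahead_alt m 0 = m := by
  simp [find_n_jmonth_ahead_alt]

-- B absorbs one step of A (month field ≤ 12, nonnegative remaining count)
theorem alt_step (m : Int) (n : Int) (hn : 0 ≤ n) (h2 : m % 100 ≤ 12) :
    find_n_jmonth_ahead_alt m (n + 1) = find_n_jmonth_ahead_alt (pvStep m) n := by
  simp only [find_n_jmonth_ahead_alt, pvStep, fd100, md100, fd12, md12]
  split_ifs with h <;> omega

theorem a_step (m : Int) : find_n_jmonth_ahead m 1 = pvStep m := by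
  rw [find_n_jmonth_ahead]; simp [pvStep]

theorem a_alt_agree (n : Nat) : ∀ m : Int, m % 100 ≤ 12 →
    find_n_jmonth_ahead m (n : Int) = find_n_jmonth_ahead_alt m (n : Int) := by
  induction n with
  | zero =>
      intro m h2
      have h0 := alt_zero m
      rw [find_n_jmonth_ahead]
      norm_num [h0]
  | succ k ih =>
      intro m h2
      have hc : ((k + 1 : Nat) : Int) = ((k : Nat) : Int) + 1 := by push_cast; ring
      have hstep := step_valid m h2
      rcases Nat.eq_zero_or_pos k with hk | hk
      · subst hk
        have h0 : ((0 + 1 : Nat) : Int) = (1 : Int) := by norm_num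
        rw [h0, a_step, show (1 : Int) = 0 + 1 from rfl, alt_step m 0 le_rfl h2,
          alt_zero (pvStep m)]
      · rw [hc, find_n_jmonth_ahead]
        have hne1 : ¬ ((k : Int) + 1 = 1) := by omega
        have hne0 : ¬ ((k : Int) + 1 = 0) := by omega
        have hgt : (1 : Int) < (k : Int) + 1 := by omega
        rw [if_neg hne1, if_neg hne0, if_pos hgt, a_step]
        have hm1 : (k : Int) + 1 - 1 = ((k : Nat) : Int) := by ring
        rw [hm1, ih (pvStep m) hstep, ← alt_step m _ (by omega) h2]

-- ===== VERDICT (by name: the statement is the Claim_ definition above) =====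
theorem find_n_jmonth_ahead_spec : Claim_equal_find_n_jmonth_ahead := by
  intro m h _ hpre
  obtain ⟨hh, h2⟩ := hpre
  unfold Spec_find_n_jmonth_ahead
  have hcast : h = ((h.toNat : Nat) : Int) := (Int.toNat_of_nonneg hh).symm
  rw [hcast, a_alt_agree h.toNat m h2]
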